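-- pv_equiv track=rewrite | github.com/LAHumphreys/AOC | tools/combinations.py | generate
-- ===== SOURCE A (Python) =====
-- def generate(length: int, valid_values: list, consecutive_repeats=0):
--     """
--     Generate lists of fixed length from a set of valid values (which may repeat)
--
--     An optional constraint may be imposed (consecutive_repeats) that requires
--     at least one set of repeated digits.
--     """
--     results = []
--     if length > 0:
--         for value in valid_values:
--             results.append([value])
--
--         i = 1
--         while i < length:
--             new_results = []
--             for header in results:
--                 for value in valid_values:
--                     new_results.append(header + [value])
--             results = new_results
--             i += 1
--
--         if consecutive_repeats > 0:
--             new_results = []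
--             for result in results:
--                 repeated = 0
--                 i = 1
--                 while repeated < consecutive_repeats and i < length:
--                     if result[i - 1 - repeated] == result[i]:
--                         repeated += 1
--                     else:
--                         repeated = 0
--                     i += 1
--                 if repeated >= consecutive_repeats:
--                     new_results.append(result)
--
--             results = new_results
--
--     return results
-- ===== SOURCE B (Python) =====
-- def generate(length: int, valid_values: list, consecutive_repeats=0):
--     if length <= 0:
--         return []
--
--     def prod(n):
--         if n == 0:
--             return [[]]
--         tails = prod(n - 1)
--         return [[v] + t for v in valid_values for t in tails]
--
--     results = prod(length)
--
--     if consecutive_repeats > 0: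
--         def max_run(r):
--             best = cur = 1
--             for a, b in zip(r, r[1:]):
--                 cur = cur + 1 if a == b else 1
--                 best = max(best, cur)
--             return best
--         results = [r for r in results if max_run(r) >= consecutive_repeats + 1]
--
--     return results
-- ===== Notes on version B (the rewrite author's own statement) =====
-- stated objective: alternative
-- what changed: Replaces A's in-place widening loop (repeatedly appending one value to every partial list) and its index-juggling two-pointer repeat counter by a recursive product that prepends values to shorter tuples and a single adjacent-pair max-run scan (best/cur over zip(r, r[1:])) used as a filter predicate.
import Mathlib
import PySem

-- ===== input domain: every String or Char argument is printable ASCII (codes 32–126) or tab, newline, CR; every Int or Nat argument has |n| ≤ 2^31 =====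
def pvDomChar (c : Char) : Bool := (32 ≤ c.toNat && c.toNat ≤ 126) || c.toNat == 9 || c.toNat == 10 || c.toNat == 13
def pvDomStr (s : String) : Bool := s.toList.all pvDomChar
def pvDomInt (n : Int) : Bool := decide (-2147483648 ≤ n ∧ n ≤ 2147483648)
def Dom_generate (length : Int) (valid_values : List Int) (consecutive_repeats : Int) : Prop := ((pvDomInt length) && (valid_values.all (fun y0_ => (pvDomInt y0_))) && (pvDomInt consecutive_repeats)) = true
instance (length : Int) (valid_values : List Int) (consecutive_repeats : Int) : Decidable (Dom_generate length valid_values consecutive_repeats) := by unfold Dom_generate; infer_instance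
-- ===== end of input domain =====

-- B replaces A's widening append loop and two-pointer repeat counter by a recursive
-- prepend product and an adjacent-pair max-run scan (alternative decomposition, same cost).

-- ===== PORT A =====
-- the inner while loop of A's filter phase: state (repeated, i); fuel bounds the remaining iterations
def aWhile (result : List Int) (cr L : Int) : Nat → Int → Int → Int
  | 0, repeated, _ => repeated
  | fuel+1, repeated, i =>
    if repeated < cr ∧ i < L then
      if PySem.List.pyGet? result (i - 1 - repeated) = PySem.List.pyGet? result i then
        aWhile result cr L fuel (repeated + 1) (i + 1)
      else
        aWhile result cr L fuel 0 (i + 1)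
    else repeated

-- the outer while loop building the lists: each pass extends every partial list by one value at the end
def aBuild (valid_values : List Int) : Nat → List (List Int) → List (List Int)
  | 0, results => results
  | k+1, results =>
    aBuild valid_values k (results.flatMap (fun header => valid_values.map (fun value => header ++ [value])))

def generate (length : Int) (valid_values : List Int) (consecutive_repeats : Int) : List (List Int) :=
  if length > 0 then
    let results := aBuild valid_values (length - 1).toNat (valid_values.map (fun value => [value]))
    if consecutive_repeats > 0 then
      results.filter (fun result =>
        decide (consecutive_repeats ≤ aWhile result consecutive_repeats length (length - 1).toNat 0 1))
    else results
  else []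

-- ===== PORT B =====
-- Source B's prod: prepend each value to every shorter tuple
def bProd (valid_values : List Int) : Nat → List (List Int)
  | 0 => [[]]
  | n+1 => valid_values.flatMap (fun v => (bProd valid_values n).map (fun t => v :: t))

-- Source B's max_run loop over zip(r, r[1:]) with accumulators best, cur
def bMaxRunGo (best cur : Int) : List (Int × Int) → Int
  | [] => best
  | (a, b) :: t =>
    let cur' := if a = b then cur + 1 else 1
    bMaxRunGo (max best cur') cur' t

def bMaxRun (r : List Int) : Int := bMaxRunGo 1 1 (r.zip r.tail)

def generate_alt (length : Int) (valid_values : List Int) (consecutive_repeats : Int) : List (List Int) :=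
  if length ≤ 0 then []
  else
    let results := bProd valid_values length.toNat
    if consecutive_repeats > 0 then
      results.filter (fun r => decide (consecutive_repeats + 1 ≤ bMaxRun r))
    else results

-- ===== PRECONDITION & SPEC =====
def Spec_generate (length : Int) (valid_values : List Int) (consecutive_repeats : Int) (out : List (List Int)) : Prop := out = generate_alt length valid_values consecutive_repeats
instance (length : Int) (valid_values : List Int) (consecutive_repeats : Int) (out : List (List Int)) : Decidable (Spec_generate length valid_values consecutive_repeats out) := by unfold Spec_generate; infer_instance

-- ===== CLAIM (what is proved, stated in full; the proofs are below) =====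
def Claim_equal_generate : Prop := ∀ (length : Int) (valid_values : List Int) (consecutive_repeats : Int), Dom_generate length valid_values consecutive_repeats → Spec_generate length valid_values consecutive_repeats (generate length valid_values consecutive_repeats)

-- ===== LEMMAS AND PROOFS =====

-- early-exit run counter over the adjacent-pair list (proof-side bridge between the two loops)
def eWhile (cr : Int) : Int → List (Int × Int) → Int
  | rep, [] => rep
  | rep, (a, b) :: t => if rep < cr then eWhile cr (if a = b then rep + 1 else 0) t else rep

theorem eWhile_of_ge (cr rep : Int) (h : cr ≤ rep) (l : List (Int × Int)) : eWhile cr rep l = rep := by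
  cases l with
  | nil => rfl
  | cons p t => obtain ⟨a, b⟩ := p; simp [eWhile]; omega

theorem bMaxRunGo_le (cur : Int) (l : List (Int × Int)) : ∀ best : Int, best ≤ bMaxRunGo best cur l := by
  induction l generalizing cur with
  | nil => intro best; simp [bMaxRunGo]
  | cons p t ih =>
    intro best
    obtain ⟨a, b⟩ := p
    simp only [bMaxRunGo]
    exact le_trans (le_max_left _ _) (ih _ _)

-- step 2: early-exit counter reaches cr iff the max-run scan reaches cr+1
theorem eWhile_iff_maxRun (cr : Int) (hcr : 1 ≤ cr) :
    ∀ (l : List (Int × Int)) (rep best : Int), 0 ≤ rep → rep < cr → best ≤ cr →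
      (cr ≤ eWhile cr rep l ↔ cr + 1 ≤ bMaxRunGo best (rep + 1) l) := by
  intro l
  induction l with
  | nil =>
    intro rep best _ h2 h3
    simp only [eWhile, bMaxRunGo]
    omega
  | cons p t ih =>
    intro rep best h1 h2 h3
    obtain ⟨a, b⟩ := p
    simp only [eWhile, bMaxRunGo, if_pos h2]
    by_cases hab : a = b
    · simp only [if_pos hab]
      by_cases hlt : rep + 1 < cr
      · exact ih (rep + 1) (max best (rep + 1 + 1)) (by omega) hlt (by omega)
      · have heq : rep + 1 = cr := by omega
        rw [eWhile_of_ge cr (rep + 1) (by omega)]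
        constructor
        · intro _
          calc cr + 1 ≤ max best (rep + 1 + 1) := by omega
            _ ≤ _ := bMaxRunGo_le _ _ _
        · intro _; omega
    · simp only [if_neg hab]
      have := ih 0 (max best 1) le_rfl (by omega) (by omega)
      simpa using this

-- step 1: A's index-based while loop equals the list-based counter on the pair list
theorem aWhile_eq_eWhile (r : List Int) (cr : Int) :
    ∀ (fuel : Nat) (i : Nat) (rep : Int), 1 ≤ i → i ≤ r.length → fuel = r.length - i →
      0 ≤ rep → rep ≤ (i : Int) - 1 →
      (∀ j : Nat, i - 1 - rep.toNat ≤ j → j < i → r.getD j 0 = r.getD (i - 1) 0) →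
      aWhile r cr (r.length : Int) fuel rep (i : Int) = eWhile cr rep ((r.zip r.tail).drop (i - 1)) := by
  intro fuel
  induction fuel with
  | zero =>
    intro i rep h1 h2 hfuel _ _ _
    have hi : i = r.length := by omega
    have hdrop : ((r.zip r.tail).drop (i - 1)) = [] := by
      apply List.drop_eq_nil_of_le
      simp only [List.length_zip, List.length_tail]
      omega
    rw [hdrop]
    rfl
  | succ fuel ih =>
    intro i rep h1 h2 hfuel hrep0 hrepi hinv
    have hilt : i < r.length := by omega
    have hlen : (r.zip r.tail).length = r.length - 1 := by
      simp only [List.length_zip, List.length_tail]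
      omega
    have hidx : i - 1 < (r.zip r.tail).length := by omega
    have hi1 : i - 1 < r.length := by omega
    have hi1t : i - 1 < r.tail.length := by simp [List.length_tail]; omega
    have hdrop : (r.zip r.tail).drop (i - 1)
        = (r.getD (i - 1) 0, r.getD i 0) :: (r.zip r.tail).drop (i - 1 + 1) := by
      rw [List.drop_eq_getElem_cons hidx]
      congr 1
      rw [List.getElem_zip]
      have e1 : r[i-1]'hi1 = r.getD (i - 1) 0 := by
        rw [List.getD_eq_getElem?_getD, List.getElem?_eq_getElem hi1]; rfl
      have e2 : r.tail[i-1]'hi1t = r.getD i 0 := by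
        rw [List.getElem_tail]
        have hii : i - 1 + 1 = i := by omega
        rw [List.getD_eq_getElem?_getD, List.getElem?_eq_getElem (by omega : i < r.length)]
        simp [hii]
      rw [e1, e2]
    rw [hdrop]
    simp only [aWhile, eWhile]
    by_cases hcr : rep < cr
    · have hcond : (rep < cr ∧ (i : Int) < (r.length : Int)) := ⟨hcr, by exact_mod_cast hilt⟩
      rw [if_pos hcond, if_pos hcr]
      have hk : (i : Int) - 1 - rep = ((i - 1 - rep.toNat : Nat) : Int) := by omega
      have hklt : i - 1 - rep.toNat < r.length := by omega
      have hg1 : PySem.List.pyGet? r ((i : Int) - 1 - rep) = some (r.getD (i - 1 - rep.toNat) 0) := by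
        rw [hk, PySem.List.pyGet?_natCast, List.getElem?_eq_getElem hklt,
          List.getD_eq_getElem?_getD, List.getElem?_eq_getElem hklt]
        rfl
      have hg2 : PySem.List.pyGet? r (i : Int) = some (r.getD i 0) := by
        rw [PySem.List.pyGet?_natCast, List.getElem?_eq_getElem hilt,
          List.getD_eq_getElem?_getD, List.getElem?_eq_getElem hilt]
        rfl
      have hstart : r.getD (i - 1 - rep.toNat) 0 = r.getD (i - 1) 0 :=
        hinv _ le_rfl (by omega)
      rw [hg1, hg2, hstart]
      by_cases hab : r.getD (i - 1) 0 = r.getD i 0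
      · rw [if_pos (by rw [hab]), if_pos hab]
        have hcast : (i : Int) + 1 = ((i + 1 : Nat) : Int) := by push_cast; ring
        have hnext := ih (i + 1) (rep + 1) (by omega) (by omega) (by omega) (by omega)
          (by push_cast; omega) ?_
        · rw [show i - 1 + 1 = i from by omega, hcast, hnext, Nat.add_sub_cancel]
        · intro j hj1 hj2
          have hij : i + 1 - 1 = i := by omega
          rw [hij] at hj1 ⊢
          rcases Nat.lt_or_ge j i with hji | hji
          · have : r.getD j 0 = r.getD (i - 1) 0 := by
              apply hinv j ?_ hji
              omega
            rw [this, hab]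
          · have : j = i := by omega
            rw [this]
      · rw [if_neg (fun hc => hab (Option.some.inj hc)), if_neg hab]
        have hcast : (i : Int) + 1 = ((i + 1 : Nat) : Int) := by push_cast; ring
        have hnext := ih (i + 1) 0 (by omega) (by omega) (by omega) le_rfl
          (by push_cast; omega) ?_
        · rw [show i - 1 + 1 = i from by omega, hcast, hnext, Nat.add_sub_cancel]
        · intro j hj1 hj2
          have : j = i := by omega
          rw [this]
          congr 1
    · rw [if_neg (by tauto), if_neg hcr]

theorem mem_bProd_length (vs : List Int) (n : Nat) (r : List Int) (h : r ∈ bProd vs n) : r.length = n := by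
  induction n generalizing r with
  | zero => simp [bProd] at h; simp [h]
  | succ n ih =>
    simp only [bProd, List.mem_flatMap, List.mem_map] at h
    obtain ⟨v, _, t, ht, rfl⟩ := h
    simp [ih t ht]

theorem bProd_succ_append (vs : List Int) (n : Nat) :
    (bProd vs n).flatMap (fun h => vs.map (fun v => h ++ [v])) = bProd vs (n + 1) := by
  induction n with
  | zero => simp [bProd, List.map_eq_flatMap]
  | succ n ih =>
    conv_rhs => rw [bProd, ← ih]
    simp only [bProd, List.flatMap_assoc, List.map_flatMap, List.flatMap_map, List.map_map]
    rfl

theorem aBuild_bProd (vs : List Int) : ∀ (k m : Nat), aBuild vs k (bProd vs (m + 1)) = bProd vs (m + 1 + k) := by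
  intro k
  induction k with
  | zero => intro m; rfl
  | succ k ih =>
    intro m
    show aBuild vs k ((bProd vs (m + 1)).flatMap _) = _
    rw [bProd_succ_append, ih (m + 1)]
    congr 1
    omega

theorem bProd_one (vs : List Int) : vs.map (fun v => [v]) = bProd vs 1 := by
  simp [bProd, List.map_eq_flatMap]

-- ===== VERDICT (by name: the statement is the Claim_ definition above) =====
theorem generate_spec : Claim_equal_generate := by
  intro length vs cr _
  unfold Spec_generate generate generate_alt
  by_cases hL : length > 0
  · rw [if_pos hL, if_neg (show ¬length ≤ 0 from by omega)]
    have hbuild : aBuild vs (length - 1).toNat (vs.map (fun v => [v])) = bProd vs length.toNat := by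
      rw [bProd_one, aBuild_bProd vs (length - 1).toNat 0]
      congr 1
      omega
    simp only [hbuild]
    by_cases hcr : cr > 0
    · rw [if_pos hcr, if_pos hcr]
      apply List.filter_congr
      intro r hr
      have hrlen : r.length = length.toNat := mem_bProd_length vs _ r hr
      have hrlenI : (r.length : Int) = length := by omega
      have h1 : aWhile r cr length (length - 1).toNat 0 1
          = eWhile cr 0 ((r.zip r.tail).drop 0) := by
        have := aWhile_eq_eWhile r cr (length - 1).toNat 1 0 le_rfl (by omega) (by omega)
          le_rfl (by norm_num) (by intro j h1 h2; interval_cases j; rfl)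
        simpa [hrlenI] using this
      have h2 := eWhile_iff_maxRun cr (by omega) (r.zip r.tail) 0 1 le_rfl hcr (by omega)
      simp only [h1, List.drop_zero]
      simp only [decide_eq_decide]
      simpa [bMaxRun] using h2
    · rw [if_neg hcr, if_neg hcr]
  · rw [if_neg hL, if_pos (show length ≤ 0 from by omega)]
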